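-- pv_equiv track=rewrite | github.com/hwmaltby/project-euler | problem_36.py | palindromes_less_than
-- ===== SOURCE A (Python) =====
-- def palindromes_less_than(n):
--     """Returns a sorted list of all palindromes less than n."""
--     pals = []
--     if n < 10:
--         return list(range(1, n + 1))
--     l = len(str(n))
--     for i in range(1, l + 1):
--         q, r = divmod(i + 1, 2)
--         for j in range(10 ** (q -1), 10 ** q):
--             j = str(j)
--             if r == 0:
--                 pal = int(j + j[-2::-1])
--             else:
--                 pal = int(j + j[::-1])
--             if pal < n:
--                 pals.append(pal)
--     return pals
-- ===== SOURCE B (Python) =====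
-- def _pal_strings(k, lo):
--     """All k-digit palindromic strings (leading digit >= lo), in increasing order,
--     built recursively by wrapping a digit around each (k-2)-digit palindrome."""
--     if k == 0:
--         return ['']
--     if k == 1:
--         return [str(d) for d in range(lo, 10)]
--     return [str(d) + s + str(d) for d in range(lo, 10) for s in _pal_strings(k - 2, 0)]
--
--
-- def palindromes_less_than(n):
--     """Returns a sorted list of all palindromes less than n."""
--     pals = []
--     if n < 10:
--         return list(range(1, n + 1))
--     l = len(str(n))
--     for i in range(1, l + 1):
--         for s in _pal_strings(i, 1):
--             pal = int(s)
--             if pal < n: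
--                 pals.append(pal)
--     return pals
-- ===== Notes on version B (the rewrite author's own statement) =====
-- stated objective: alternative
-- what changed: B abandons A's half-mirroring (enumerating half-values j and gluing j to its reversed slice) and instead generates the palindromic strings of each length recursively, wrapping an outer digit around every palindrome two digits shorter; A's single-digit guard and outer per-length loop are kept.
import Mathlib
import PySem

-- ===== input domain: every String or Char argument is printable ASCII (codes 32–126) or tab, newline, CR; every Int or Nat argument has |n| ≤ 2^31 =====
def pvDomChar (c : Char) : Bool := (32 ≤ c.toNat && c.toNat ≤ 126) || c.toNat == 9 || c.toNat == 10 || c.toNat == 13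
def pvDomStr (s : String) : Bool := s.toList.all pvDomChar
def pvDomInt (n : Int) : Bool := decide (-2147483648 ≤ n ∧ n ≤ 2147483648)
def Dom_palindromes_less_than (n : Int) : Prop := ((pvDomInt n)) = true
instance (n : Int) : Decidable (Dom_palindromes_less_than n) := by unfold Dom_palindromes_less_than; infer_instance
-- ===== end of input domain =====

-- B replaces A's half-mirroring (glueing each half-value j to its reversed slice) with a
-- recursive generator of the palindromic strings of each length (wrapping an outer digit
-- around every palindrome two digits shorter); same values, different construction.

-- ===== PORT A =====
-- Notes on exactness: q ≥ 1 always holds inside the loop, so 10 ** (q-1) is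
-- ported as (10:Int) ^ (q-1).toNat; slice? returns none only for step 0, so
-- .getD [] is exact; int() on a nonempty digit string never raises, so the
-- .getD 0 after ofChars? is exact.
def palindromes_less_than (n : Int) : List Int :=
  if n < 10 then
    PySem.List.pyRange 1 (n + 1)
  else
    let l : Int := PySem.Str.len (PySem.Int.toStr n)
    (PySem.List.pyRange 1 (l + 1)).foldl (fun pals i =>
      let q := PySem.Int.floordiv (i + 1) 2
      let r := PySem.Int.mod (i + 1) 2
      (PySem.List.pyRange ((10 : Int) ^ (q - 1).toNat) ((10 : Int) ^ q.toNat)).foldl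
        (fun pals j =>
          let js := PySem.Int.toChars j
          let pal : Int :=
            if r = 0 then
              (PySem.Int.ofChars? (js ++ ((PySem.List.slice? js (some (-2)) none (-1)).getD []))).getD 0
            else
              (PySem.Int.ofChars? (js ++ ((PySem.List.slice? js none none (-1)).getD []))).getD 0
          if pal < n then pals ++ [pal] else pals) pals) []

-- ===== PORT B =====
-- _pal_strings(k, lo): k only ever receives the nonnegative loop index i (and i-2, i-4, …),
-- so it is ported with a Nat recursion parameter (called at i.toNat); str(d) is toChars d.
def palStrings : Nat → Int → List (List Char)
  | 0, _ => [[]]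
  | 1, lo => (PySem.List.pyRange lo 10).map (fun d => PySem.Int.toChars d)
  | (k+2), lo => (PySem.List.pyRange lo 10).flatMap (fun d =>
      (palStrings k 0).map (fun s => PySem.Int.toChars d ++ s ++ PySem.Int.toChars d))

def palindromes_less_than_alt (n : Int) : List Int :=
  if n < 10 then
    PySem.List.pyRange 1 (n + 1)
  else
    let l : Int := PySem.Str.len (PySem.Int.toStr n)
    (PySem.List.pyRange 1 (l + 1)).foldl (fun pals i =>
      (palStrings i.toNat 1).foldl (fun pals s =>
        let pal : Int := (PySem.Int.ofChars? s).getD 0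
        if pal < n then pals ++ [pal] else pals) pals) []

-- ===== PRECONDITION & SPEC =====
def Spec_palindromes_less_than (n : Int) (out : List Int) : Prop := out = palindromes_less_than_alt n
instance (n : Int) (out : List Int) : Decidable (Spec_palindromes_less_than n out) := by unfold Spec_palindromes_less_than; infer_instance

-- ===== CLAIM (what is proved, stated in full; the proofs are below) =====
def Claim_equal_palindromes_less_than : Prop := ∀ (n : Int), Dom_palindromes_less_than n → Spec_palindromes_less_than n (palindromes_less_than n)

-- ===== LEMMAS AND PROOFS =====

-- decimal value of a digit string, as both ports compute it
def chVal (s : List Char) : Int := (PySem.Int.ofChars? s).getD 0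

-- the two palindromes A builds from the decimal string of a half j
def oPal (j : Int) : Int :=
  chVal (PySem.Int.toChars j ++ ((PySem.List.slice? (PySem.Int.toChars j) (some (-2)) none (-1)).getD []))
def ePal (j : Int) : Int :=
  chVal (PySem.Int.toChars j ++ ((PySem.List.slice? (PySem.Int.toChars j) none none (-1)).getD []))

def hRange (q : Int) : List Int :=
  PySem.List.pyRange ((10 : Int) ^ (q - 1).toNat) ((10 : Int) ^ q.toNat)

def oBlock (n q : Int) : List Int := ((hRange q).filter (fun j => oPal j < n)).map oPal
def eBlock (n q : Int) : List Int := ((hRange q).filter (fun j => ePal j < n)).map ePal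

-- what A's i-th outer iteration appends
def aBlock (n i : Int) : List Int :=
  if PySem.Int.mod (i + 1) 2 = 0 then oBlock n (PySem.Int.floordiv (i + 1) 2)
  else eBlock n (PySem.Int.floordiv (i + 1) 2)

-- what B's i-th outer iteration appends
def bBlock (n i : Int) : List Int :=
  ((palStrings i.toNat 1).filter (fun s => chVal s < n)).map chVal

lemma floordiv_two_mul (q : Int) : PySem.Int.floordiv (2 * q) 2 = q := by
  rw [PySem.Int.floordiv_eq_iff_of_pos (by norm_num)]; omega

lemma floordiv_two_mul_add_one (q : Int) : PySem.Int.floordiv (2 * q + 1) 2 = q := by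
  rw [PySem.Int.floordiv_eq_iff_of_pos (by norm_num)]; omega

lemma mod_two_mul (q : Int) : PySem.Int.mod (2 * q) 2 = 0 := by
  rw [PySem.Int.mod_eq_zero_iff_dvd]; exact ⟨q, rfl⟩

lemma mod_two_mul_add_one (q : Int) : PySem.Int.mod (2 * q + 1) 2 = 1 := by
  rcases PySem.Int.mod_two_eq (2 * q + 1) with h | h
  · rw [PySem.Int.mod_eq_zero_iff_dvd] at h; omega
  · exact h

lemma foldl_filt {α : Type} (f : α → Int) (n : Int) (xs : List α) (acc : List Int) :
    xs.foldl (fun pals j => if f j < n then pals ++ [f j] else pals) acc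
      = acc ++ (xs.filter (fun j => f j < n)).map f := by
  induction xs generalizing acc with
  | nil => simp
  | cons x xs ih =>
      simp only [List.foldl_cons, List.filter_cons, decide_eq_true_eq]
      split_ifs <;> simp_all

lemma foldl_eq_flatMap_of {α : Type} (F : List α → Int → List α) (g : Int → List α)
    (R : List Int) (h : ∀ pals i, F pals i = pals ++ g i) :
    R.foldl F [] = R.flatMap g := by
  have hF : F = fun pals i => pals ++ g i := funext fun p => funext fun i => h p i
  rw [hF]
  exact PySem.List.foldl_append_eq_flatMap g R []

lemma A_eq_flatMap (n : Int) (hn : ¬ n < 10) :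
    palindromes_less_than n
      = (PySem.List.pyRange 1 (PySem.Str.len (PySem.Int.toStr n) + 1)).flatMap (aBlock n) := by
  rw [palindromes_less_than, if_neg hn]
  refine foldl_eq_flatMap_of _ (aBlock n) _ ?_
  intro pals i
  rcases PySem.Int.mod_two_eq (i + 1) with h | h
  · simp only [h, reduceIte, aBlock]
    exact foldl_filt oPal n _ pals
  · simp only [h, reduceIte, aBlock, one_ne_zero]
    exact foldl_filt ePal n _ pals

lemma B_eq_flatMap (n : Int) (hn : ¬ n < 10) :
    palindromes_less_than_alt n
      = (PySem.List.pyRange 1 (PySem.Str.len (PySem.Int.toStr n) + 1)).flatMap (bBlock n) := by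
  rw [palindromes_less_than_alt, if_neg hn]
  refine foldl_eq_flatMap_of _ (bBlock n) _ ?_
  intro pals i
  exact foldl_filt chVal n _ pals

-- ---------- decimal-string infrastructure ----------

-- str(m) for a natural m, as toDigits computes it
def rep (m : Nat) : List Char :=
  if m < 10 then [Nat.digitChar m] else rep (m / 10) ++ [Nat.digitChar (m % 10)]
  decreasing_by exact Nat.div_lt_self (by omega) (by omega)

lemma rep_of_lt {m : Nat} (h : m < 10) : rep m = [Nat.digitChar m] := by
  rw [rep]; exact if_pos h

lemma rep_of_ge {m : Nat} (h : ¬ m < 10) : rep m = rep (m / 10) ++ [Nat.digitChar (m % 10)] := by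
  rw [rep]; exact if_neg h

lemma toDigitsCore_eq_rep : ∀ (fuel m : Nat) (ds : List Char), m < fuel →
    Nat.toDigitsCore 10 fuel m ds = rep m ++ ds := by
  intro fuel
  induction fuel with
  | zero => intro m ds h; omega
  | succ fuel ih =>
      intro m ds h
      rw [Nat.toDigitsCore]
      by_cases h10 : m < 10
      · have : m / 10 = 0 := Nat.div_eq_of_lt h10
        simp only [this, reduceIte]
        rw [rep_of_lt h10, Nat.mod_eq_of_lt h10]
        rfl
      · have hne : ¬ m / 10 = 0 := by
          intro hz; exact h10 (by omega)
        simp only [hne, reduceIte]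
        rw [ih (m / 10) _ (by omega), rep_of_ge h10]
        simp

lemma toChars_natCast (m : Nat) : PySem.Int.toChars (m : Int) = rep m := by
  rw [PySem.Int.toChars]
  rw [if_neg (by omega)]
  rw [Nat.toDigits, toDigitsCore_eq_rep _ _ _ (by omega)]
  simp

-- zero-padded q-digit decimal string of m (m < 10^q)
def pad : Nat → Nat → List Char
  | 0, _ => []
  | (q+1), m => pad q (m / 10) ++ [Nat.digitChar (m % 10)]

lemma pad_length (q : Nat) : ∀ m, (pad q m).length = q := by
  induction q with
  | zero => intro m; rfl
  | succ q ih => intro m; simp [pad, ih]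

lemma pad_ne_nil (q : Nat) (m : Nat) : pad (q+1) m ≠ [] := by
  intro h
  have := pad_length (q+1) m
  rw [h] at this
  simp at this

lemma rep_eq_pad : ∀ (q : Nat) (m : Nat), 10 ^ q ≤ m → m < 10 ^ (q + 1) → rep m = pad (q + 1) m := by
  intro q
  induction q with
  | zero =>
      intro m h1 h2
      rw [rep_of_lt (by omega)]
      simp [pad, Nat.mod_eq_of_lt (by omega : m < 10)]
  | succ q ih =>
      intro m h1 h2
      have h10 : ¬ m < 10 := by
        have : (10:Nat) ≤ 10 ^ (q+1) := Nat.le_self_pow (by omega) 10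
        omega
      rw [rep_of_ge h10, pad]
      congr 1
      refine ih (m / 10) ?_ ?_
      · rw [Nat.le_div_iff_mul_le (by norm_num)]
        calc 10 ^ q * 10 = 10 ^ (q+1) := by ring
        _ ≤ m := h1
      · rw [Nat.div_lt_iff_lt_mul (by norm_num)]
        calc m < 10 ^ (q+2) := h2
        _ = 10 ^ (q+1) * 10 := by ring

lemma pad_top : ∀ (q m : Nat), m < 10 ^ (q + 1) →
    pad (q + 1) m = Nat.digitChar (m / 10 ^ q) :: pad q (m % 10 ^ q) := by
  intro q
  induction q with
  | zero =>
      intro m h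
      simp [pad, Nat.mod_eq_of_lt (by omega : m < 10)]
  | succ q ih =>
      intro m h
      show pad (q+1) (m / 10) ++ [Nat.digitChar (m % 10)] = _
      rw [ih (m / 10) (by
        rw [Nat.div_lt_iff_lt_mul (by norm_num)]
        calc m < 10 ^ (q+2) := h
        _ = 10 ^ (q+1) * 10 := by ring)]
      have e1 : m / 10 / 10 ^ q = m / 10 ^ (q+1) := by
        rw [Nat.div_div_eq_div_mul]; ring_nf
      have e2 : m / 10 % 10 ^ q = m % 10 ^ (q+1) / 10 := by
        rw [pow_succ', Nat.mod_mul_right_div_self]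
      have e3 : m % 10 ^ (q+1) % 10 = m % 10 := by
        exact Nat.mod_mod_of_dvd m (dvd_pow_self 10 (by omega))
      rw [e1, e2]
      show _ :: (pad q (m % 10 ^ (q+1) / 10) ++ [Nat.digitChar (m % 10)]) = _
      rw [← e3]
      rfl

-- pure-Nat version of palStrings
def natPS : Nat → Nat → List (List Char)
  | 0, _ => [[]]
  | 1, lo => (List.range' lo (10 - lo)).map (fun d => [Nat.digitChar d])
  | (k+2), lo => (List.range' lo (10 - lo)).flatMap (fun d =>
      (natPS k 0).map (fun s => Nat.digitChar d :: (s ++ [Nat.digitChar d])))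

lemma pyRange_natCast (a b : Nat) :
    PySem.List.pyRange (a : Int) (b : Int) 1 = (List.range' a (b - a)).map (fun m : Nat => (m : Int)) := by
  rw [PySem.List.pyRange_one, List.range'_eq_map_range, List.map_map]
  have : ((b : Int) - (a : Int)).toNat = b - a := by omega
  rw [this]
  refine List.map_congr_left ?_
  intro k _
  simp

lemma palStrings_eq_natPS : ∀ (k : Nat) (lo : Nat), lo ≤ 10 →
    palStrings k (lo : Int) = natPS k lo := by
  intro k
  induction k using Nat.strong_induction_on with
  | _ k ih =>
      intro lo hlo
      match k with
      | 0 => rfl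
      | 1 =>
          show (PySem.List.pyRange (lo : Int) 10 1).map _ = _
          rw [show (10:Int) = ((10:Nat):Int) by norm_num, pyRange_natCast, List.map_map]
          refine List.map_congr_left ?_
          intro d hd
          have hd10 : d < 10 := by
            rw [List.mem_range'] at hd; omega
          show PySem.Int.toChars (d : Int) = [Nat.digitChar d]
          rw [toChars_natCast, rep_of_lt hd10]
      | (k+2) =>
          show (PySem.List.pyRange (lo : Int) 10 1).flatMap _ = _
          rw [show (10:Int) = ((10:Nat):Int) by norm_num, pyRange_natCast, List.flatMap_map]
          rw [natPS]
          refine List.flatMap_congr ?_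
          intro d hd
          have hd10 : d < 10 := by
            rw [List.mem_range'] at hd; omega
          have hk := ih k (by omega) 0 (by omega)
          rw [Nat.cast_zero] at hk
          rw [hk]
          refine List.map_congr_left ?_
          intro s _
          rw [toChars_natCast, rep_of_lt hd10]
          simp

-- split a multiple-of-t range into top-digit sub-ranges
lemma range'_flatMap_split (t : Nat) : ∀ (k a : Nat),
    (List.range' a k).flatMap (fun d => List.range' (d * t) t) = List.range' (a * t) (k * t) := by
  intro k
  induction k with
  | zero => intro a; simp
  | succ k ih =>
      intro a
      rw [List.range'_succ, List.flatMap_cons, ih (a + 1),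
          show (a+1) * t = a * t + 1 * t by ring, List.range'_append,
          show (k+1) * t = t + k * t by ring]

lemma range'_mul_eq_map (d t : Nat) :
    List.range' (d * t) t = (List.range t).map (fun r => d * t + r) := by
  rw [List.range'_eq_map_range]

-- sliced helpers shared by the two mirror lemmas
lemma pad_split (q d r : Nat) (hd : d < 10) (hr : r < 10 ^ (q+1)) :
    pad (q+2) (d * 10 ^ (q+1) + r) = Nat.digitChar d :: pad (q+1) r := by
  have hlt : d * 10 ^ (q+1) + r < 10 ^ (q+2) := by
    have h1 : d * 10 ^ (q+1) + r < (d+1) * 10 ^ (q+1) := by nlinarith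
    have h2 : (d+1) * 10 ^ (q+1) ≤ 10 * 10 ^ (q+1) := Nat.mul_le_mul_right _ (by omega)
    calc d * 10 ^ (q+1) + r < (d+1) * 10 ^ (q+1) := h1
    _ ≤ 10 * 10 ^ (q+1) := h2
    _ = 10 ^ (q+2) := by ring
  rw [pad_top (q+1) _ hlt]
  have hdiv : (d * 10 ^ (q+1) + r) / 10 ^ (q+1) = d := by
    rw [show d * 10 ^ (q+1) + r = 10 ^ (q+1) * d + r by ring,
        Nat.mul_add_div (by positivity), Nat.div_eq_of_lt hr]
    omega
  have hmod : (d * 10 ^ (q+1) + r) % 10 ^ (q+1) = r := by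
    rw [show d * 10 ^ (q+1) + r = 10 ^ (q+1) * d + r by ring, Nat.mul_add_mod,
        Nat.mod_eq_of_lt hr]
  rw [hdiv, hmod]

-- A's odd-length mirror of the padded half equals B's recursive generation
lemma mirror_odd_eq : ∀ (q : Nat) (lo : Nat), lo ≤ 10 →
    (List.range' (lo * 10 ^ q) ((10 - lo) * 10 ^ q)).map
        (fun m => pad (q+1) m ++ (pad (q+1) m).dropLast.reverse)
      = natPS (2 * q + 1) lo := by
  intro q
  induction q with
  | zero =>
      intro lo hlo
      simp only [pow_zero, mul_one]
      show _ = (List.range' lo (10 - lo)).map _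
      refine List.map_congr_left ?_
      intro m hm
      have hm10 : m < 10 := by rw [List.mem_range'] at hm; omega
      simp [pad, Nat.mod_eq_of_lt hm10]
  | succ q ih =>
      intro lo hlo
      rw [← range'_flatMap_split (10 ^ (q+1)) (10 - lo) lo, List.map_flatMap]
      show _ = natPS (2*q+1+2) lo
      rw [natPS]
      refine List.flatMap_congr ?_
      intro d hd
      have hd10 : d < 10 := by rw [List.mem_range'] at hd; omega
      rw [range'_mul_eq_map, List.map_map]
      rw [← ih 0 (by omega), zero_mul, Nat.sub_zero,
          show (10 : Nat) * 10 ^ q = 10 ^ (q+1) by ring,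
          show List.range' 0 (10 ^ (q+1)) = List.range (10 ^ (q+1)) by rw [List.range_eq_range'],
          List.map_map]
      refine List.map_congr_left ?_
      intro r hr
      have hrt : r < 10 ^ (q+1) := List.mem_range.mp hr
      show pad (q+2) (d * 10 ^ (q+1) + r) ++ (pad (q+2) (d * 10 ^ (q+1) + r)).dropLast.reverse = _
      rw [pad_split q d r hd10 hrt,
          List.dropLast_cons_of_ne_nil (pad_ne_nil q r), List.reverse_cons]
      simp [List.append_assoc]

-- A's even-length mirror of the padded half equals B's recursive generation
lemma mirror_even_eq : ∀ (q : Nat) (lo : Nat), lo ≤ 10 →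
    (List.range' (lo * 10 ^ q) ((10 - lo) * 10 ^ q)).map
        (fun m => pad (q+1) m ++ (pad (q+1) m).reverse)
      = natPS (2 * q + 2) lo := by
  intro q
  induction q with
  | zero =>
      intro lo hlo
      simp only [pow_zero, mul_one]
      show _ = natPS (0+2) lo
      rw [natPS]
      simp only [natPS, List.map_cons, List.map_nil]
      rw [List.map_eq_flatMap]
      refine List.flatMap_congr ?_
      intro m hm
      have hm10 : m < 10 := by rw [List.mem_range'] at hm; omega
      simp [pad, Nat.mod_eq_of_lt hm10]
  | succ q ih =>
      intro lo hlo
      rw [← range'_flatMap_split (10 ^ (q+1)) (10 - lo) lo, List.map_flatMap]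
      show _ = natPS (2*q+2+2) lo
      rw [natPS]
      refine List.flatMap_congr ?_
      intro d hd
      have hd10 : d < 10 := by rw [List.mem_range'] at hd; omega
      rw [range'_mul_eq_map, List.map_map]
      rw [← ih 0 (by omega), zero_mul, Nat.sub_zero,
          show (10 : Nat) * 10 ^ q = 10 ^ (q+1) by ring,
          show List.range' 0 (10 ^ (q+1)) = List.range (10 ^ (q+1)) by rw [List.range_eq_range'],
          List.map_map]
      refine List.map_congr_left ?_
      intro r hr
      have hrt : r < 10 ^ (q+1) := List.mem_range.mp hr
      show pad (q+2) (d * 10 ^ (q+1) + r) ++ (pad (q+2) (d * 10 ^ (q+1) + r)).reverse = _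
      rw [pad_split q d r hd10 hrt, List.reverse_cons]
      simp [List.append_assoc]

-- xs[-2::-1] is reverse-of-dropLast
lemma map_getElem_countdown {α : Type} (ys : List α) (m : Nat) (hm : ys.length = m + 2) :
    (List.range (m+1)).map (fun x : Nat => ys[((m : Int) + -(x : Int)).toNat]'(by omega))
      = ys.dropLast.reverse := by
  apply List.ext_getElem
  · simp [hm]
  · intro i h1 h2
    simp only [List.getElem_map, List.getElem_range, List.getElem_reverse, List.getElem_dropLast]
    have h1' : i < m + 1 := by simpa using h1
    have e : (((m : Int)) + -(i : Int)).toNat = m - i := by omega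
    simp only [e, List.length_dropLast, hm]
    simp only [show m + 2 - 1 - 1 - i = m - i from by omega]

lemma sliceDrop {α : Type} (xs : List α) :
    PySem.List.slice? xs (some (-2)) none (-1) = some xs.dropLast.reverse := by
  match xs with
  | [] => rfl
  | [a] => rfl
  | a :: b :: t =>
      rw [PySem.List.slice?]
      rw [if_neg (by norm_num)]
      have hlen : ((a :: b :: t).length : Int) = (t.length : Int) + 2 := by
        simp only [List.length_cons]
        push_cast
        ring
      rw [PySem.List.sliceIndices]
      simp only [hlen]
      norm_num
      rw [if_pos (by omega : (-1 : Int) < (t.length : Int))]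
      rw [show (b :: t).dropLast.reverse ++ [a] = (a :: b :: t).dropLast.reverse from by
        rw [List.dropLast_cons_of_ne_nil (List.cons_ne_nil b t), List.reverse_cons]]
      exact map_getElem_countdown (a :: b :: t) t.length (by simp)

-- value of a block: A's i-th block equals B's i-th block
lemma filtmap_congr {α β : Type} (f : α → Int) (g : β → Int) (n : Int) (l1 : List α) (l2 : List β)
    (h : l1.map f = l2.map g) :
    (l1.filter (fun x => decide (f x < n))).map f = (l2.filter (fun s => decide (g s < n))).map g := by
  have e1 : (l1.filter (fun x => decide (f x < n))).map f
      = (l1.map f).filter (fun v => decide (v < n)) := by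
    conv_rhs => rw [List.filter_map]
    rfl
  have e2 : (l2.filter (fun s => decide (g s < n))).map g
      = (l2.map g).filter (fun v => decide (v < n)) := by
    conv_rhs => rw [List.filter_map]
    rfl
  rw [e1, e2, h]

lemma hRange_natCast (m : Nat) :
    hRange ((m + 1 : Nat) : Int)
      = (List.range' (1 * 10 ^ m) ((10 - 1) * 10 ^ m)).map (fun x : Nat => (x : Int)) := by
  rw [hRange]
  have e1 : (((m + 1 : Nat) : Int) - 1).toNat = m := by omega
  have e2 : ((m + 1 : Nat) : Int).toNat = m + 1 := by omega
  rw [e1, e2, show (10 : Int) ^ m = ((10 ^ m : Nat) : Int) by push_cast; ring,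
      show (10 : Int) ^ (m + 1) = ((10 ^ (m + 1) : Nat) : Int) by push_cast; ring,
      pyRange_natCast]
  have h9 : ((10 : Nat) - 1) * 10 ^ m = 10 ^ (m + 1) - 10 ^ m := by
    have h10 : (10 : Nat) ^ (m + 1) = 10 * 10 ^ m := by ring
    omega
  rw [show (1 : Nat) * 10 ^ m = 10 ^ m by ring, h9]

lemma oPal_natCast (m m0 : Nat) (h1 : 10 ^ m ≤ m0) (h2 : m0 < 10 ^ (m + 1)) :
    oPal ((m0 : Nat) : Int) = chVal (pad (m + 1) m0 ++ (pad (m + 1) m0).dropLast.reverse) := by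
  rw [oPal, toChars_natCast, rep_eq_pad m m0 h1 h2, sliceDrop]
  rfl

lemma ePal_natCast (m m0 : Nat) (h1 : 10 ^ m ≤ m0) (h2 : m0 < 10 ^ (m + 1)) :
    ePal ((m0 : Nat) : Int) = chVal (pad (m + 1) m0 ++ (pad (m + 1) m0).reverse) := by
  rw [ePal, toChars_natCast, rep_eq_pad m m0 h1 h2, PySem.List.slice?_none_none_neg_one]
  rfl

lemma oBlock_eq (n : Int) (m : Nat) :
    oBlock n (((m + 1 : Nat)) : Int)
      = ((natPS (2 * m + 1) 1).filter (fun s => decide (chVal s < n))).map chVal := by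
  rw [oBlock]
  refine filtmap_congr oPal chVal n _ _ ?_
  rw [hRange_natCast, List.map_map, ← mirror_odd_eq m 1 (by omega), List.map_map]
  refine List.map_congr_left ?_
  intro m0 hm0
  rw [List.mem_range'] at hm0
  have h1 : 10 ^ m ≤ m0 := by omega
  have h2 : m0 < 10 ^ (m + 1) := by
    have : (10 : Nat) ^ (m + 1) = 10 * 10 ^ m := by ring
    omega
  exact oPal_natCast m m0 h1 h2

lemma eBlock_eq (n : Int) (m : Nat) :
    eBlock n (((m + 1 : Nat)) : Int)
      = ((natPS (2 * m + 2) 1).filter (fun s => decide (chVal s < n))).map chVal := by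
  rw [eBlock]
  refine filtmap_congr ePal chVal n _ _ ?_
  rw [hRange_natCast, List.map_map, ← mirror_even_eq m 1 (by omega), List.map_map]
  refine List.map_congr_left ?_
  intro m0 hm0
  rw [List.mem_range'] at hm0
  have h1 : 10 ^ m ≤ m0 := by omega
  have h2 : m0 < 10 ^ (m + 1) := by
    have : (10 : Nat) ^ (m + 1) = 10 * 10 ^ m := by ring
    omega
  exact ePal_natCast m m0 h1 h2

lemma aBlock_eq_bBlock (n i : Int) (hi : 1 ≤ i) : aBlock n i = bBlock n i := by
  have hk : i = ((i.toNat : Nat) : Int) := by omega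
  have hone : ((1 : Nat) : Int) = (1 : Int) := by norm_num
  have hps : palStrings i.toNat 1 = natPS i.toNat 1 := by
    rw [← hone, palStrings_eq_natPS i.toNat 1 (by omega)]
  rcases Nat.even_or_odd i.toNat with ⟨m, hm⟩ | ⟨m, hm⟩
  · -- i.toNat = 2m = 2(m-1)+2 with m ≥ 1
    have hm1 : ∃ m', i.toNat = 2 * m' + 2 := by
      refine ⟨m - 1, ?_⟩
      omega
    obtain ⟨m', hm'⟩ := hm1
    have hi1 : i + 1 = 2 * (((m' + 1 : Nat)) : Int) + 1 := by omega
    rw [aBlock, hi1, mod_two_mul_add_one, floordiv_two_mul_add_one]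
    rw [if_neg (by norm_num)]
    rw [bBlock, hps, hm', eBlock_eq n m']
  · -- i.toNat = 2m+1
    have hi1 : i + 1 = 2 * (((m + 1 : Nat)) : Int) := by omega
    rw [aBlock, hi1, mod_two_mul, floordiv_two_mul]
    rw [if_pos rfl]
    rw [bBlock, hps, hm, oBlock_eq n m]

lemma main_case (n : Int) (hn : ¬ n < 10) :
    palindromes_less_than n = palindromes_less_than_alt n := by
  rw [A_eq_flatMap n hn, B_eq_flatMap n hn]
  refine List.flatMap_congr ?_
  intro i hi
  have h1 : 1 ≤ i := (PySem.List.mem_pyRange_one.mp hi).1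
  exact aBlock_eq_bBlock n i h1

-- ===== VERDICT (by name: the statement is the Claim_ definition above) =====
theorem palindromes_less_than_spec : Claim_equal_palindromes_less_than := by
  intro n _
  show palindromes_less_than n = palindromes_less_than_alt n
  by_cases hn : n < 10
  · rw [palindromes_less_than, if_pos hn, palindromes_less_than_alt, if_pos hn]
  · exact main_case n hn
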